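-- pv_equiv track=rewrite | github.com/AbdallahYettou/ML-Mini-project-uncover-browsing-patterns | cleanningData/clean_usersessions.py | clean_session
-- ===== SOURCE A (Python) =====
-- NOISE_PATHS = {
--     '/images',
--     '/icons',
--     '/htbin',
--     '/cgi-bin',
--     '/cgi',
--     '/bin',
--     '/static',
--     '/assets',
--     '/css',
--     '/js',
--     '/fonts',
--     '/media',
-- }
--
-- NOISE_PREFIXES = [
--     '/images/',
--     '/icons/',
--     '/htbin/',
--     '/cgi-bin/',
--     '/cgi/',
--     '/static/',
--     '/assets/',
--     '/css/',
--     '/js/',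
--     '/fonts/',
--     '/media/',
-- ]
--
-- def is_noise_path(path):
--     """
--     Check if a path is a noise path that should be filtered out.
--     """
--     path = path.strip()
--
--     # Check exact matches
--     if path in NOISE_PATHS:
--         return True
--
--     # Check prefixes
--     for prefix in NOISE_PREFIXES:
--         if path.startswith(prefix):
--             return True
--
--     return False
--
-- def remove_consecutive_duplicates(paths):
--     """
--     Remove consecutive duplicate paths within a session.
--     """
--     if not paths:
--         return paths
--
--     result = [paths[0]]
--     for path in paths[1:]:
--         if path != result[-1]:
--             result.append(path)
--     return result
--
-- def clean_session(session_line):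
--     """
--     Clean a single session by removing noise paths.
--     Returns cleaned paths or None if session becomes invalid.
--     """
--     paths = session_line.strip().split(',')
--
--     # Filter out noise paths
--     cleaned_paths = [p.strip() for p in paths if p.strip() and not is_noise_path(p.strip())]
--
--     # Remove empty strings and paths that are just "/"
--     cleaned_paths = [p for p in cleaned_paths if p and p != '/']
--
--     # Remove consecutive duplicates
--     cleaned_paths = remove_consecutive_duplicates(cleaned_paths)
--
--     # Return None if session has less than 2 meaningful paths
--     if len(cleaned_paths) < 2:
--         return None
--
--     return cleaned_paths
-- ===== SOURCE B (Python) =====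
-- NOISE_PATHS = {
--     '/images', '/icons', '/htbin', '/cgi-bin', '/cgi', '/bin',
--     '/static', '/assets', '/css', '/js', '/fonts', '/media',
-- }
--
-- def _is_noise(s):
--     # Look up the first path segment (up to the second '/') in the noise table:
--     # an exact noise path matches whole, a noise prefix matches with a '/' following
--     # ('/bin' is the one noise path that is not also a noise prefix).
--     i = s.find('/', 1)
--     root = s if i < 0 else s[:i]
--     return root in NOISE_PATHS and (i < 0 or root != '/bin')
--
-- def clean_session(session_line):
--     kept = [s for s in (p.strip() for p in session_line.strip().split(','))
--             if s and s != '/' and not _is_noise(s)]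
--     # drop an element exactly when it equals its predecessor: pair the stream
--     # with itself shifted by one (None in front of the first element)
--     result = [x for x, prev in zip(kept, [None] + kept) if x != prev]
--     return result if len(result) > 1 else None
-- ===== Notes on version B (the rewrite author's own statement) =====
-- stated objective: alternative
-- what changed: B replaces A's noise test (exact-match set plus a loop over 11 prefixes) by extracting the first path segment up to the second '/' and looking it up once in the noise set, and replaces A's accumulator-based consecutive-dedupe helper by zipping the filtered stream with itself shifted by one and keeping elements that differ from their predecessor.
import Mathlib
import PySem

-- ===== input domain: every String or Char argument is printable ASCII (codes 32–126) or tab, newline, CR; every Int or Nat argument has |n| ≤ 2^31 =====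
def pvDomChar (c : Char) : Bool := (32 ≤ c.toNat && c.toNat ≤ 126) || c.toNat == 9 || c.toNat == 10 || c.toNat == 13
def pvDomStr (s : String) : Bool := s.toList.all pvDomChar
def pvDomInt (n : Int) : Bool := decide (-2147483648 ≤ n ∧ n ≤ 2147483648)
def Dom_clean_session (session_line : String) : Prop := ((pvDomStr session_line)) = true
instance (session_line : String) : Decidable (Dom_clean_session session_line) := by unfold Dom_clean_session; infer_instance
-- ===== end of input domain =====

-- B replaces A's set-membership-plus-prefix-loop noise test by a single lookup of the first
-- path segment, and A's accumulator dedupe helper by pairing the stream with itself shifted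
-- by one; objective: alternative (same cost, different mechanisms).

-- ===== PORT A =====
-- NOISE_PATHS (a Python set of distinct literals; only membership is ever tested)
def pvNoisePaths : List String :=
  ["/images", "/icons", "/htbin", "/cgi-bin", "/cgi", "/bin",
   "/static", "/assets", "/css", "/js", "/fonts", "/media"]

def pvNoisePrefixes : List String :=
  ["/images/", "/icons/", "/htbin/", "/cgi-bin/", "/cgi/",
   "/static/", "/assets/", "/css/", "/js/", "/fonts/", "/media/"]

def is_noise_path (path : String) : Bool :=
  let path := PySem.Str.strip path
  if pvNoisePaths.contains path then true
  else pvNoisePrefixes.any (fun pre => PySem.Str.startswith path pre)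

def remove_consecutive_duplicates (paths : List String) : List String :=
  match paths with
  | [] => paths
  | p0 :: rest =>
    -- result is nonempty throughout, so paths[-1]'s default "" is never read
    rest.foldl (fun result path =>
      if path ≠ PySem.List.pyGetD result (-1) "" then result ++ [path] else result) [p0]

def clean_session (session_line : String) : Option (List String) :=
  -- sep "," is nonempty, so split? is always `some`; getD [] is never read
  let paths := (PySem.Str.split? (PySem.Str.strip session_line) ",").getD []
  let cleaned := (paths.filter (fun p =>
      PySem.Str.strip p ≠ "" && !is_noise_path (PySem.Str.strip p))).map PySem.Str.strip
  let cleaned2 := cleaned.filter (fun p => p ≠ "" && p ≠ "/")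
  let cleaned3 := remove_consecutive_duplicates cleaned2
  if cleaned3.length < 2 then none else some cleaned3

-- ===== PORT B =====
-- B's noise test: look up the first path segment (up to the second '/') in the noise table
def pv_is_noise (s : String) : Bool :=
  let i := PySem.Str.findFrom s "/" 1
  let root := if i < 0 then s else PySem.Str.slice s none (some i)
  pvNoisePaths.contains root && (decide (i < 0) || root ≠ "/bin")

def clean_session_alt (session_line : String) : Option (List String) :=
  let kept := (((PySem.Str.split? (PySem.Str.strip session_line) ",").getD []).map
      PySem.Str.strip).filter (fun s => s ≠ "" && s ≠ "/" && !pv_is_noise s)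
  -- Python's [None] + kept is a heterogeneous list; modeled as Option String (None ↦ none),
  -- and 'x != prev' is 'some x ≠ prev'
  let result := ((kept.zip (none :: kept.map some)).filter
      (fun xp => some xp.1 ≠ xp.2)).map (fun xp => xp.1)
  if result.length > 1 then some result else none

-- ===== PRECONDITION & SPEC =====
def Spec_clean_session (session_line : String) (out : Option (List String)) : Prop := out = clean_session_alt session_line
instance (session_line : String) (out : Option (List String)) : Decidable (Spec_clean_session session_line out) := by unfold Spec_clean_session; infer_instance

-- ===== CLAIM (what is proved, stated in full; the proofs are below) =====
def Claim_equal_clean_session : Prop := ∀ (session_line : String), Dom_clean_session session_line → Spec_clean_session session_line (clean_session session_line)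

-- ===== LEMMAS AND PROOFS =====

-- the head of a dropWhile always fails the predicate
theorem head?_dropWhile {α : Type} (p : α → Bool) (l : List α) (a : α)
    (h : (List.dropWhile p l).head? = some a) : p a = false := by
  induction l with
  | nil => simp at h
  | cons x xs ih =>
    by_cases hx : p x
    · rw [List.dropWhile_cons_of_pos hx] at h; exact ih h
    · rw [List.dropWhile_cons_of_neg hx] at h
      simp only [List.head?_cons, Option.some.injEq] at h
      subst h; simpa using hx

-- a prefix of a dropWhile is left unchanged by dropWhile
theorem prefix_dropWhile {α : Type} (p : α → Bool) (l l' : List α)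
    (h : l' <+: List.dropWhile p l) : List.dropWhile p l' = l' := by
  cases l' with
  | nil => simp
  | cons a t =>
    obtain ⟨u, hu⟩ := h
    have ha : p a = false := by
      refine head?_dropWhile p l a ?_
      rw [← hu]; rfl
    simp [List.dropWhile_cons, ha]

theorem chars_strip_idem (l : List Char) :
    PySem.Chars.strip (PySem.Chars.strip l) = PySem.Chars.strip l := by
  have hpref : PySem.Chars.rstrip (PySem.Chars.lstrip l) <+: PySem.Chars.lstrip l := by
    have h1 := List.dropWhile_suffix (l := (PySem.Chars.lstrip l).reverse) PySem.Chars.isspace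
    have h2 := List.reverse_prefix.mpr h1
    unfold PySem.Chars.rstrip
    simpa using h2
  have hl : PySem.Chars.lstrip (PySem.Chars.rstrip (PySem.Chars.lstrip l)) =
      PySem.Chars.rstrip (PySem.Chars.lstrip l) := by
    unfold PySem.Chars.lstrip at hpref ⊢
    exact prefix_dropWhile _ _ _ hpref
  have hr : ∀ u, PySem.Chars.rstrip (PySem.Chars.rstrip u) = PySem.Chars.rstrip u := by
    intro u
    unfold PySem.Chars.rstrip
    rw [List.reverse_reverse, List.dropWhile_idempotent]
  unfold PySem.Chars.strip
  rw [hl, hr]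

theorem strip_idem (s : String) :
    PySem.Str.strip (PySem.Str.strip s) = PySem.Str.strip s := by
  unfold PySem.Str.strip
  rw [String.toList_ofList, chars_strip_idem]

-- is_noise_path on an already-stripped token, as one Bool disjunction
theorem noise_strip (p : String) :
    is_noise_path (PySem.Str.strip p) =
      (pvNoisePaths.contains (PySem.Str.strip p)
        || pvNoisePrefixes.any (fun pre => PySem.Str.startswith (PySem.Str.strip p) pre)) := by
  unfold is_noise_path
  rw [strip_idem]
  cases h : pvNoisePaths.contains (PySem.Str.strip p) <;>
    simp only [h, Bool.false_eq_true, if_false, if_true, Bool.false_or, Bool.true_or]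

-- A's filter decision, as an Option (some = the kept stripped token)
def pvG (p : String) : Option String :=
  let s := PySem.Str.strip p
  if s = "" || s = "/" || pvNoisePaths.contains s
      || pvNoisePrefixes.any (fun pre => PySem.Str.startswith s pre) then
    none
  else
    some s

-- A's two filters + map collapse to the filterMap of the combined filter decision
theorem pipeline_eq_filterMap (ps : List String) :
    ((ps.filter (fun p =>
        PySem.Str.strip p ≠ "" && !is_noise_path (PySem.Str.strip p))).map
      PySem.Str.strip).filter (fun p => p ≠ "" && p ≠ "/") =
    ps.filterMap pvG := by
  induction ps with
  | nil => rfl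
  | cons p rest ih =>
    simp only [ne_eq, decide_not] at ih
    by_cases h1 : PySem.Str.strip p = ""
    · have hg : pvG p = none := by simp [pvG, h1]
      simp [List.filter_cons, List.filterMap_cons, h1, hg, ih]
    · by_cases h2 : PySem.Str.strip p = "/"
      · have hg : pvG p = none := by simp [pvG, h2]
        have hn : is_noise_path (PySem.Str.strip p) = false := by rw [h2]; decide
        by_cases hf : is_noise_path (PySem.Str.strip p) = true
        · simp [hn] at hf
        · simp [List.filter_cons, List.filterMap_cons, h1, h2, hg, hn, ih,
            (by decide : is_noise_path "/" = false)]
      · cases h3 : pvNoisePaths.contains (PySem.Str.strip p) <;>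
          cases h4 : pvNoisePrefixes.any
            (fun pre => PySem.Str.startswith (PySem.Str.strip p) pre)
        · have h3' : PySem.Str.strip p ∉ pvNoisePaths := by simpa using h3
          have h4' : ∀ x ∈ pvNoisePrefixes,
              PySem.Chars.startswith (PySem.Chars.strip p.toList) x.toList = false := by
            simpa using h4
          have hg : pvG p = some (PySem.Str.strip p) := by
            simp [pvG, h1, h2, h3']
            exact h4'
          have hn : is_noise_path (PySem.Str.strip p) = false := by
            rw [noise_strip, h3, h4]; rfl
          simp [List.filter_cons, List.filterMap_cons, h1, h2, hg, hn, ih]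
        · have h4' : ∃ x ∈ pvNoisePrefixes,
              PySem.Chars.startswith (PySem.Chars.strip p.toList) x.toList = true := by
            simpa using h4
          have hg : pvG p = none := by simp [pvG, h4']
          have hn : is_noise_path (PySem.Str.strip p) = true := by
            rw [noise_strip, h3, h4]; rfl
          simp [List.filter_cons, List.filterMap_cons, hg, hn, ih]
        · have h3' : PySem.Str.strip p ∈ pvNoisePaths := by simpa using h3
          have hg : pvG p = none := by simp [pvG, h3']
          have hn : is_noise_path (PySem.Str.strip p) = true := by
            rw [noise_strip, h3, h4]; rfl
          simp [List.filter_cons, List.filterMap_cons, hg, hn, ih]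
        · have h3' : PySem.Str.strip p ∈ pvNoisePaths := by simpa using h3
          have hg : pvG p = none := by simp [pvG, h3']
          have hn : is_noise_path (PySem.Str.strip p) = true := by
            rw [noise_strip, h3, h4]; rfl
          simp [List.filter_cons, List.filterMap_cons, hg, hn, ih]

-- ---- B's noise test equals A's (set membership + prefix scan) ----

-- a noise prefix '/'++rt++'/' starts a string iff the first '/' after position 0 closes
-- exactly the segment rt
theorem prefix_root_iff (c : Char) (t rt : List Char) (j : Nat)
    (hj : t[j]? = some '/') (hmin : ∀ i, i < j → t[i]? ≠ some '/') (hrt : '/' ∉ rt) :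
    (('/' :: rt ++ ['/']) <+: (c :: t)) ↔ (c = '/' ∧ t.take j = rt) := by
  constructor
  · rintro ⟨u, hu⟩
    simp only [List.cons_append, List.append_assoc, List.singleton_append] at hu
    injection hu with hc ht
    refine ⟨hc.symm, ?_⟩
    have hjeq : j = rt.length := by
      by_contra hne2
      rcases Nat.lt_or_ge j rt.length with hlt | hge
      · have h1 : t[j]? = rt[j]? := by rw [← ht, List.getElem?_append_left hlt]
        rw [hj] at h1
        exact hrt (List.mem_of_getElem? h1.symm)
      · have hgt : rt.length < j := by omega
        have h2 : t[rt.length]? = some '/' := by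
          rw [← ht, List.getElem?_append_right (le_refl _)]
          simp
        exact hmin rt.length hgt h2
    rw [hjeq, ← ht, List.take_left]
  · rintro ⟨hc, htake⟩
    subst hc
    obtain ⟨hjlt, hti⟩ := List.getElem?_eq_some_iff.mp hj
    refine ⟨t.drop (j + 1), ?_⟩
    have hdrop : t.drop j = '/' :: t.drop (j + 1) := by
      rw [List.drop_eq_getElem_cons hjlt, hti]
    calc ('/' :: rt ++ ['/']) ++ t.drop (j + 1)
        = '/' :: (rt ++ ('/' :: t.drop (j + 1))) := by simp
      _ = '/' :: (t.take j ++ t.drop j) := by rw [htake, hdrop]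
      _ = '/' :: t := by rw [List.take_append_drop]

-- if s has no '/' past position 0 it cannot start with a noise prefix (which has one)
theorem startswith_false_of_no_slash (s pre : String)
    (hm : '/' ∉ s.toList.drop 1) (hp : '/' ∈ pre.toList.drop 1) :
    PySem.Str.startswith s pre = false := by
  rw [Bool.eq_false_iff]
  intro h
  have hb : PySem.Chars.startswith s.toList pre.toList = true := by
    have : PySem.Str.startswith s pre = PySem.Chars.startswith s.toList pre.toList := by
      simp [pysem]
    rw [← this]; exact h
  have hpref : pre.toList <+: s.toList := (PySem.Chars.startswith_iff _ _).mp hb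
  exact hm ((hpref.drop 1).subset hp)

-- an exact noise path has no '/' past position 0
theorem contains_false_of_slash (s : String) (hm : '/' ∈ s.toList.drop 1) :
    pvNoisePaths.contains s = false := by
  rw [Bool.eq_false_iff]
  intro h
  have hmem : s ∈ pvNoisePaths := List.contains_iff_mem.mp h
  fin_cases hmem <;> revert hm <;> decide

-- B's segment-lookup noise test = A's membership + prefix scan, on every string
set_option maxHeartbeats 1000000 in
theorem noise_eq (s : String) :
    pv_is_noise s =
      (pvNoisePaths.contains s
        || pvNoisePrefixes.any (fun pre => PySem.Str.startswith s pre)) := by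
  have hbridge : PySem.Str.findFrom s "/" 1 = PySem.Chars.findFrom s.toList ['/'] 1 := by
    simp [pysem]
  cases hcs : s.toList with
  | nil =>
    have hs : s = "" := String.toList_inj.mp (by rw [hcs]; rfl)
    subst hs; decide
  | cons c t =>
    have hfind : PySem.Str.findFrom s "/" 1 =
        if PySem.Chars.find t ['/'] = -1 then -1 else 1 + PySem.Chars.find t ['/'] := by
      rw [hbridge, hcs,
        show ((1 : Int)) = ((1 : Nat) : Int) from rfl,
        PySem.Chars.findFrom_natCast _ _ 1 (by simp)]
      simp
    by_cases hmem : '/' ∈ t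
    · -- there is a '/' past position 0: the segment lookup decides prefix matches
      have hinf : ['/'] <:+: t := (List.singleton_infix_iff _ _).mpr hmem
      have hpos : 0 ≤ PySem.Chars.find t ['/'] :=
        (PySem.Chars.find_nonneg_iff t ['/']).mpr hinf
      have hne : PySem.Chars.find t ['/'] ≠ -1 := by omega
      obtain ⟨hpre0, hmin0⟩ := PySem.Chars.find_spec (s := t) (sub := ['/']) hpos
      set f := PySem.Chars.find t ['/'] with hf
      set j := f.toNat with hjdef
      have hj : t[j]? = some '/' := by
        obtain ⟨u, hu⟩ := hpre0
        rw [← List.head?_drop, ← hu]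
        rfl
      have hminj : ∀ i, i < j → t[i]? ≠ some '/' := by
        intro i hi hcon
        obtain ⟨hilt, hti⟩ := List.getElem?_eq_some_iff.mp hcon
        refine hmin0 i hi ⟨t.drop (i + 1), ?_⟩
        show '/' :: t.drop (i + 1) = t.drop i
        rw [List.drop_eq_getElem_cons hilt, hti]
      have hnotneg : ¬ (1 + f < 0) := by omega
      have hiexpr : PySem.Str.findFrom s "/" 1 = 1 + f := by
        rw [hfind, if_neg hne]
      have hroot : (PySem.Str.slice s none (some (1 + f))).toList = c :: t.take j := by
        have hb : (PySem.Str.slice s none (some (1 + f))).toList =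
            PySem.List.slice s.toList none (some (1 + f)) := by
          simp [pysem, PySem.Chars.slice_eq_listSlice]
        rw [hb, PySem.List.slice_to s.toList (by omega), hcs]
        have h1f : (1 + f).toNat = j + 1 := by omega
        rw [h1f, List.take_succ_cons]
      unfold pv_is_noise
      rw [hiexpr]
      simp only [if_neg hnotneg, decide_eq_false hnotneg, Bool.false_or]
      set root := PySem.Str.slice s none (some (1 + f)) with hrootdef
      have key : ∀ (r pre : String) (rt : List Char), r.toList = '/' :: rt → '/' ∉ rt →
          pre.toList = '/' :: rt ++ ['/'] →
          (PySem.Str.startswith s pre = true ↔ root = r) := by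
        intro r pre rt hr hrt hpre
        have hb : PySem.Str.startswith s pre =
            PySem.Chars.startswith s.toList pre.toList := by simp [pysem]
        rw [hb, PySem.Chars.startswith_iff, hcs, hpre,
          prefix_root_iff c t rt j hj hminj hrt, ← String.toList_inj, hroot, hr,
          List.cons.injEq]
      have hAex : pvNoisePaths.contains s = false :=
        contains_false_of_slash s (by rw [hcs]; simpa using hmem)
      have p1 := key "/images" "/images/" "images".toList rfl (by decide) rfl
      have p2 := key "/icons" "/icons/" "icons".toList rfl (by decide) rfl
      have p3 := key "/htbin" "/htbin/" "htbin".toList rfl (by decide) rfl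
      have p4 := key "/cgi-bin" "/cgi-bin/" "cgi-bin".toList rfl (by decide) rfl
      have p5 := key "/cgi" "/cgi/" "cgi".toList rfl (by decide) rfl
      have p6 := key "/static" "/static/" "static".toList rfl (by decide) rfl
      have p7 := key "/assets" "/assets/" "assets".toList rfl (by decide) rfl
      have p8 := key "/css" "/css/" "css".toList rfl (by decide) rfl
      have p9 := key "/js" "/js/" "js".toList rfl (by decide) rfl
      have p10 := key "/fonts" "/fonts/" "fonts".toList rfl (by decide) rfl
      have p11 := key "/media" "/media/" "media".toList rfl (by decide) rfl
      apply Bool.coe_iff_coe.mp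
      simp only [Bool.and_eq_true, Bool.or_eq_true, List.any_eq_true,
        decide_eq_true_eq, hAex, Bool.false_eq_true, false_or,
        List.contains_iff_mem, pvNoisePaths, pvNoisePrefixes,
        List.mem_cons, List.not_mem_nil, or_false]
      constructor
      · rintro ⟨hmem12, hbin⟩
        rcases hmem12 with h | h | h | h | h | h | h | h | h | h | h | h
        · exact Or.inr ⟨"/images/", by decide, p1.mpr h⟩
        · exact Or.inr ⟨"/icons/", by decide, p2.mpr h⟩
        · exact Or.inr ⟨"/htbin/", by decide, p3.mpr h⟩
        · exact Or.inr ⟨"/cgi-bin/", by decide, p4.mpr h⟩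
        · exact Or.inr ⟨"/cgi/", by decide, p5.mpr h⟩
        · exact absurd h hbin
        · exact Or.inr ⟨"/static/", by decide, p6.mpr h⟩
        · exact Or.inr ⟨"/assets/", by decide, p7.mpr h⟩
        · exact Or.inr ⟨"/css/", by decide, p8.mpr h⟩
        · exact Or.inr ⟨"/js/", by decide, p9.mpr h⟩
        · exact Or.inr ⟨"/fonts/", by decide, p10.mpr h⟩
        · exact Or.inr ⟨"/media/", by decide, p11.mpr h⟩
      · rintro (h12 | ⟨pre, hpre, hsw⟩)
        · have hmm : s ∈ pvNoisePaths := by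
            simp only [pvNoisePaths, List.mem_cons, List.not_mem_nil, or_false]
            exact h12
          rw [List.contains_iff_mem.mpr hmm] at hAex
          exact Bool.noConfusion hAex
        rcases hpre with rfl | rfl | rfl | rfl | rfl | rfl | rfl | rfl | rfl | rfl | rfl
        · rw [p1.mp hsw]; exact ⟨by decide, by decide⟩
        · rw [p2.mp hsw]; exact ⟨by decide, by decide⟩
        · rw [p3.mp hsw]; exact ⟨by decide, by decide⟩
        · rw [p4.mp hsw]; exact ⟨by decide, by decide⟩
        · rw [p5.mp hsw]; exact ⟨by decide, by decide⟩
        · rw [p6.mp hsw]; exact ⟨by decide, by decide⟩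
        · rw [p7.mp hsw]; exact ⟨by decide, by decide⟩
        · rw [p8.mp hsw]; exact ⟨by decide, by decide⟩
        · rw [p9.mp hsw]; exact ⟨by decide, by decide⟩
        · rw [p10.mp hsw]; exact ⟨by decide, by decide⟩
        · rw [p11.mp hsw]; exact ⟨by decide, by decide⟩
    · -- no '/' past position 0: no prefix can match, both sides are the exact lookup
      have hnone : PySem.Chars.find t ['/'] = -1 :=
        (PySem.Chars.find_eq_neg_one_iff t ['/']).mpr
          (fun h => hmem ((List.singleton_infix_iff _ _).mp h))
      have hiexpr : PySem.Str.findFrom s "/" 1 = -1 := by rw [hfind, if_pos hnone]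
      have hm : '/' ∉ s.toList.drop 1 := by rw [hcs]; simpa using hmem
      have hanyf : pvNoisePrefixes.any (fun pre => PySem.Str.startswith s pre) = false := by
        apply List.any_eq_false.mpr
        intro pre hpre
        fin_cases hpre <;>
          exact Bool.eq_false_iff.mp (startswith_false_of_no_slash s _ hm (by decide))
      unfold pv_is_noise
      rw [hiexpr, hanyf]
      norm_num

-- ---- B's kept stream = A's filtered pipeline ----

-- pvG written as B's single keep-test
theorem pvG_char (p : String) :
    pvG p = (if (PySem.Str.strip p ≠ "" && PySem.Str.strip p ≠ "/"
        && !pv_is_noise (PySem.Str.strip p)) then some (PySem.Str.strip p) else none) := by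
  unfold pvG
  rw [noise_eq]
  by_cases h1 : PySem.Str.strip p = ""
  · simp [h1]
  · by_cases h2 : PySem.Str.strip p = "/"
    · simp [h1, h2]
    · cases h3 : pvNoisePaths.contains (PySem.Str.strip p) <;>
        cases h4 : pvNoisePrefixes.any
            (fun pre => PySem.Str.startswith (PySem.Str.strip p) pre)
      · have h3' : PySem.Str.strip p ∉ pvNoisePaths := by simpa using h3
        have h4' : ∀ x ∈ pvNoisePrefixes,
            PySem.Chars.startswith (PySem.Chars.strip p.toList) x.toList = false := by
          simpa using h4
        simp [h1, h2, h3']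
        exact h4'
      · have h4' : ∃ x ∈ pvNoisePrefixes,
            PySem.Chars.startswith (PySem.Chars.strip p.toList) x.toList = true := by
          simpa using h4
        simp [h1, h2, h4']
      · have h3' : PySem.Str.strip p ∈ pvNoisePaths := by simpa using h3
        simp [h1, h2, h3']
      · have h3' : PySem.Str.strip p ∈ pvNoisePaths := by simpa using h3
        simp [h1, h2, h3']

-- a guarded filterMap is a map-then-filter
theorem filterMap_if {α β : Type} (f : α → β) (q : β → Bool) (l : List α) :
    l.filterMap (fun a => if q (f a) then some (f a) else none) = (l.map f).filter q := by
  induction l with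
  | nil => rfl
  | cons a l ih =>
    simp only [List.filterMap_cons, List.map_cons, List.filter_cons]
    cases h : q (f a) <;> simp [h, ih]

theorem kept_eq_filterMap (ps : List String) :
    ((ps.map PySem.Str.strip).filter
        (fun s => s ≠ "" && s ≠ "/" && !pv_is_noise s)) =
    ps.filterMap pvG := by
  rw [← filterMap_if PySem.Str.strip
      (fun s => s ≠ "" && s ≠ "/" && !pv_is_noise s) ps]
  exact List.filterMap_congr (fun p _ => (pvG_char p).symm)

-- ---- dedupe: zip-with-shift = A's accumulator loop ----

-- reference recursion: drop an element iff it equals the previously kept one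
def dedRec : Option String → List String → List String
  | _, [] => []
  | prev, x :: xs => if some x = prev then dedRec prev xs else x :: dedRec (some x) xs

theorem zipShift_eq_dedRec (m : List String) (prev : Option String) :
    ((m.zip (prev :: m.map some)).filter (fun xp => some xp.1 ≠ xp.2)).map
        (fun xp => xp.1) = dedRec prev m := by
  induction m generalizing prev with
  | nil => rfl
  | cons x xs ih =>
    simp only [List.map_cons, List.zip_cons_cons, List.filter_cons]
    by_cases h : some x = prev
    · simp only [dedRec, if_pos h]
      simp [h]
      simpa using ih prev
    · simp only [dedRec, if_neg h]
      simp [h]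
      simpa using ih (some x)

theorem foldl_loop_eq_dedRec (xs : List String) (acc : List String) (a : String)
    (h : acc.getLast? = some a) :
    xs.foldl (fun result path =>
        if path ≠ PySem.List.pyGetD result (-1) "" then result ++ [path] else result) acc
      = acc ++ dedRec (some a) xs := by
  induction xs generalizing acc a with
  | nil => simp [dedRec]
  | cons x xs ih =>
    have hacc : acc ≠ [] := by
      intro hnil; rw [hnil] at h; simp at h
    have hlast : PySem.List.pyGetD acc (-1) "" = a := by
      rw [PySem.List.pyGetD_neg_one acc "" hacc]
      exact List.getLast_of_mem_getLast? h
    simp only [List.foldl_cons, hlast]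
    by_cases hx : x = a
    · rw [if_neg (by simp [hx]), ih acc a h]
      simp [dedRec, hx]
    · rw [if_pos hx, ih (acc ++ [x]) x (by simp)]
      simp [dedRec, hx, List.append_assoc]

theorem rcd_eq_dedRec (m : List String) :
    remove_consecutive_duplicates m = dedRec none m := by
  cases m with
  | nil => rfl
  | cons p0 rest =>
    have hd : remove_consecutive_duplicates (p0 :: rest) =
        rest.foldl (fun result path =>
          if path ≠ PySem.List.pyGetD result (-1) "" then result ++ [path] else result)
          [p0] := rfl
    rw [hd, foldl_loop_eq_dedRec rest [p0] p0 rfl]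
    simp [dedRec]

-- ===== VERDICT (by name: the statement is the Claim_ definition above) =====
theorem clean_session_spec : Claim_equal_clean_session := by
  intro session_line _
  unfold Spec_clean_session
  simp only [clean_session, clean_session_alt, kept_eq_filterMap, zipShift_eq_dedRec,
    pipeline_eq_filterMap, rcd_eq_dedRec]
  set m := dedRec none
    (((PySem.Str.split? (PySem.Str.strip session_line) ",").getD []).filterMap pvG)
  by_cases h : m.length < 2
  · rw [if_pos h, if_neg (by omega)]
  · rw [if_neg h, if_pos (by omega)]
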